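-- pv_equiv track=rewrite | github.com/shanesahilu/ELN-XML | pdf_processor.py | _find_actual_content_start_column
-- ===== SOURCE A (Python) =====
-- def _find_actual_content_start_column(header_row_tuple, data_row_tuples_block, max_cols_to_check):
--     """
--     Finds the first column index (0-based) that contains actual content
--     by checking the header and a sample of data rows.
--
--     Args:
--         header_row_tuple: The identified header row (tuple of cell values).
--         data_row_tuples_block: A list of data row tuples.
--         max_cols_to_check: The number of columns to consider (width of the table).
--
--     Returns:
--         The 0-based index of the first column with content, or 0 if table is empty/no content found.
--     """
--     min_content_col_idx = max_cols_to_check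
--
--     if header_row_tuple:
--         for col_idx, cell_val in enumerate(header_row_tuple[:max_cols_to_check]):
--             if str(cell_val if cell_val is not None else "").strip():
--                 min_content_col_idx = col_idx
--                 break
--
--     for data_row_tuple in data_row_tuples_block[:5]:
--         if min_content_col_idx == 0:
--             break
--         for col_idx, cell_val in enumerate(data_row_tuple[:max_cols_to_check]):
--             if str(cell_val if cell_val is not None else "").strip():
--                 min_content_col_idx = min(min_content_col_idx, col_idx)
--                 if col_idx == 0 : break
--         if min_content_col_idx == 0: break
--
--     return min_content_col_idx if min_content_col_idx < max_cols_to_check else 0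
-- ===== SOURCE B (Python) =====
-- def _find_actual_content_start_column(header_row_tuple, data_row_tuples_block, max_cols_to_check):
--     """Column-major scan: return the first column that any considered row fills, else 0.
--
--     Correct because the first column containing content (across the header and
--     the first five data rows) is exactly the minimum over rows of each row's
--     first content index, which is what the row-wise version computes.
--     """
--     rows = ([header_row_tuple] if header_row_tuple else []) + list(data_row_tuples_block[:5])
--     limit = min(max_cols_to_check, max((len(r) for r in rows), default=0))
--     for col in range(limit):
--         if any(col < len(r) and str(r[col] if r[col] is not None else "").strip() for r in rows):
--             return col
--     return 0
-- ===== Notes on version B (the rewrite author's own statement) =====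
-- stated objective: alternative
-- what changed: Transposes the traversal: instead of A's row-wise scans maintaining a running minimum first-content index with early-exit bookkeeping, B scans column-by-column (bounded by the widest row) and returns the first column in which any considered row has non-blank content.
import Mathlib
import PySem

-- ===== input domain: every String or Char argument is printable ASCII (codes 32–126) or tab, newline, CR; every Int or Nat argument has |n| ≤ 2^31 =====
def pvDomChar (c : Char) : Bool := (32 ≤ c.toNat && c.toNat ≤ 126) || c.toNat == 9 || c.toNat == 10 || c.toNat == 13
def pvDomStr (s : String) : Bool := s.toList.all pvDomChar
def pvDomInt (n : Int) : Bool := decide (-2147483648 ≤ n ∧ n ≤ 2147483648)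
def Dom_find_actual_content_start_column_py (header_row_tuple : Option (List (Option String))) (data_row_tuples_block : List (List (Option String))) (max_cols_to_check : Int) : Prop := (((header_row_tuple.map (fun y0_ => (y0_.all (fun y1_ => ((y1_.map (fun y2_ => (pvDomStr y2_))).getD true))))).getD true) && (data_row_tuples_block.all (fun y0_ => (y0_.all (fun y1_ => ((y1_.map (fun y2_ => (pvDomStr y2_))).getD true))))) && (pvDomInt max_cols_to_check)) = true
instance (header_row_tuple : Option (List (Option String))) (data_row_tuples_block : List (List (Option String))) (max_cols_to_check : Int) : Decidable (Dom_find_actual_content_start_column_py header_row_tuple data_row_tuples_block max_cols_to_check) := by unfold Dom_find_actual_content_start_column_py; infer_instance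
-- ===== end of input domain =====

-- B transposes the traversal: instead of A's row-wise scans with a running
-- minimum, it scans column-by-column (bounded by the widest row) and returns
-- the first column any considered row fills; objective: alternative.

-- str(cell if cell is not None else "").strip() is non-empty (shared cell test)
def pvCellHasContent (c : Option String) : Bool := PySem.Str.strip (c.getD "") != ""

-- ===== PORT A =====
-- header loop: 'for col_idx, cell_val in enumerate(...): if …: min_content_col_idx = col_idx; break'
def facscHeaderLoop : List (Option String) → Int → Int → Int
  | [], _i, m => m
  | c :: rest, i, m => if pvCellHasContent c then i else facscHeaderLoop rest (i + 1) m

-- inner data-row loop with 'min(min_content_col_idx, col_idx)' and the 'col_idx == 0' break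
def facscRowLoop : List (Option String) → Int → Int → Int
  | [], _i, m => m
  | c :: rest, i, m =>
      if pvCellHasContent c then
        if i == 0 then min m i else facscRowLoop rest (i + 1) (min m i)
      else facscRowLoop rest (i + 1) m

-- outer loop over data_row_tuples_block[:5] with the 'min_content_col_idx == 0' breaks
def facscBlockLoop (maxc : Int) : List (List (Option String)) → Int → Int
  | [], m => m
  | row :: rest, m =>
      if m == 0 then m
      else
        let m' := facscRowLoop (PySem.List.slice row none (some maxc)) 0 m
        if m' == 0 then m' else facscBlockLoop maxc rest m'

def find_actual_content_start_column_py (header_row_tuple : Option (List (Option String))) (data_row_tuples_block : List (List (Option String))) (max_cols_to_check : Int) : Int :=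
  let m0 := max_cols_to_check
  let m1 :=
    match header_row_tuple with
    | some l => if !l.isEmpty then facscHeaderLoop (PySem.List.slice l none (some max_cols_to_check)) 0 m0 else m0
    | none => m0
  let m2 := facscBlockLoop max_cols_to_check (PySem.List.slice data_row_tuples_block none (some 5)) m1
  if m2 < max_cols_to_check then m2 else 0

-- ===== PORT B =====
-- 'any(col < len(r) and str(r[col] if r[col] is not None else "").strip() for r in rows)'
def facscColHasContent (rows : List (List (Option String))) (c : Int) : Bool :=
  rows.any (fun r => decide (c < (r.length : Int)) && pvCellHasContent ((PySem.List.pyGet? r c).getD none))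

-- 'for col in range(limit): if any(...): return col' then 'return 0'
def facscColScan (rows : List (List (Option String))) : List Int → Int
  | [] => 0
  | c :: rest => if facscColHasContent rows c then c else facscColScan rows rest

def find_actual_content_start_column_py_alt (header_row_tuple : Option (List (Option String))) (data_row_tuples_block : List (List (Option String))) (max_cols_to_check : Int) : Int :=
  let rows :=
    (match header_row_tuple with
     | some l => if !l.isEmpty then [l] else []
     | none => []) ++ PySem.List.slice data_row_tuples_block none (some 5)
  let limit := min max_cols_to_check (rows.foldl (fun a r => max a (r.length : Int)) 0)
  facscColScan rows (PySem.List.pyRange 0 limit 1)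

-- ===== PRECONDITION & SPEC =====
def Spec_find_actual_content_start_column_py (header_row_tuple : Option (List (Option String))) (data_row_tuples_block : List (List (Option String))) (max_cols_to_check : Int) (out : Int) : Prop := out = find_actual_content_start_column_py_alt header_row_tuple data_row_tuples_block max_cols_to_check
instance (header_row_tuple : Option (List (Option String))) (data_row_tuples_block : List (List (Option String))) (max_cols_to_check : Int) (out : Int) : Decidable (Spec_find_actual_content_start_column_py header_row_tuple data_row_tuples_block max_cols_to_check out) := by unfold Spec_find_actual_content_start_column_py; infer_instance

-- ===== CLAIM (what is proved, stated in full; the proofs are below) =====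
def Claim_equal_find_actual_content_start_column_py : Prop := ∀ (header_row_tuple : Option (List (Option String))) (data_row_tuples_block : List (List (Option String))) (max_cols_to_check : Int), Dom_find_actual_content_start_column_py header_row_tuple data_row_tuples_block max_cols_to_check → Spec_find_actual_content_start_column_py header_row_tuple data_row_tuples_block max_cols_to_check (find_actual_content_start_column_py header_row_tuple data_row_tuples_block max_cols_to_check)

-- ===== LEMMAS AND PROOFS =====

-- per-row first-content index of row[:maxc] (fallback maxc), A's header-loop applied to a row
def facscF (maxc : Int) (r : List (Option String)) : Int :=
  facscHeaderLoop (PySem.List.slice r none (some maxc)) 0 maxc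

-- the scan returns its fallback or i + k for a content cell at position k
theorem facscHeaderLoop_found (xs : List (Option String)) : ∀ (i fb : Int),
    facscHeaderLoop xs i fb = fb ∨
      ∃ (k : Nat) (c : Option String), xs[k]? = some c ∧ pvCellHasContent c = true ∧
        facscHeaderLoop xs i fb = i + k := by
  induction xs with
  | nil => intro i fb; exact Or.inl rfl
  | cons c rest ih =>
      intro i fb
      simp only [facscHeaderLoop]
      split
      · next hc =>
          right
          exact ⟨0, c, by simp, hc, by simp⟩
      · rcases ih (i + 1) fb with h | ⟨k, c', hget, hc', heq⟩
        · exact Or.inl h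
        · right
          refine ⟨k + 1, c', by simpa using hget, hc', ?_⟩
          rw [heq]; push_cast; ring

-- the scan result is at most i + k for any content cell at position k
theorem facscHeaderLoop_le (xs : List (Option String)) : ∀ (i fb : Int) (k : Nat) (c : Option String),
    xs[k]? = some c → pvCellHasContent c = true → facscHeaderLoop xs i fb ≤ i + k := by
  induction xs with
  | nil => intro i fb k c hget; simp at hget
  | cons c0 rest ih =>
      intro i fb k c hget hc
      simp only [facscHeaderLoop]
      split
      · omega
      · next hc0 =>
          cases k with
          | zero =>
              simp at hget
              rw [hget] at hc0; simp [hc] at hc0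
          | succ k' =>
              have := ih (i + 1) fb k' c (by simpa using hget) hc
              push_cast
              push_cast at this
              omega

-- fallback-or-bounded corollary
theorem facscHeaderLoop_cases (xs : List (Option String)) (i fb : Int) :
    facscHeaderLoop xs i fb = fb ∨
      (i ≤ facscHeaderLoop xs i fb ∧ facscHeaderLoop xs i fb < i + xs.length) := by
  rcases facscHeaderLoop_found xs i fb with h | ⟨k, c, hget, _, heq⟩
  · exact Or.inl h
  · right
    have hk : k < xs.length := by
      rcases List.getElem?_eq_some_iff.mp hget with ⟨h, _⟩
      exact h
    constructor <;> [skip; skip] <;> rw [heq] <;> omega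

-- the inner data-row loop computes min with the row's first content index
theorem facscRowLoop_eq_min (xs : List (Option String)) : ∀ (i m fb : Int),
    m ≤ fb → facscRowLoop xs i m = min m (facscHeaderLoop xs i fb) := by
  induction xs with
  | nil =>
      intro i m fb h
      simp only [facscRowLoop, facscHeaderLoop]
      omega
  | cons c rest ih =>
      intro i m fb h
      simp only [facscRowLoop, facscHeaderLoop]
      split
      · split
        · rfl
        · rw [ih (i + 1) (min m i) fb (by omega)]
          rcases facscHeaderLoop_cases rest (i + 1) fb with h2 | ⟨h2a, _⟩ <;> omega
      · exact ih (i + 1) m fb h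

-- bounds on the per-row first-content index for nonnegative maxc
theorem facscF_bounds (maxc : Int) (r : List (Option String)) (h : 0 ≤ maxc) :
    0 ≤ facscF maxc r ∧ facscF maxc r ≤ maxc := by
  unfold facscF
  rw [PySem.List.slice_to r h]
  rcases facscHeaderLoop_cases (r.take maxc.toNat) 0 maxc with h1 | ⟨h1, h2⟩
  · omega
  · have hlen : (r.take maxc.toNat).length ≤ maxc.toNat := by
      simp [List.length_take]
    have : ((maxc.toNat : Nat) : Int) = maxc := Int.toNat_of_nonneg h
    constructor <;> omega

-- lower bound on the per-row first-content index for nonpositive maxc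
theorem facscF_ge (maxc : Int) (r : List (Option String)) (h : maxc ≤ 0) :
    maxc ≤ facscF maxc r := by
  unfold facscF
  rcases facscHeaderLoop_cases (PySem.List.slice r none (some maxc)) 0 maxc with h1 | ⟨h1, _⟩ <;> omega

-- a per-row index below maxc points at a content cell of the row
theorem facscF_content (maxc : Int) (r : List (Option String)) (hmc : 0 ≤ maxc)
    (hlt : facscF maxc r < maxc) :
    ∃ (k : Nat) (c : Option String), (k : Int) = facscF maxc r ∧ k < r.length ∧ (k : Int) < maxc ∧
      r[k]? = some c ∧ pvCellHasContent c = true := by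
  have hsl : PySem.List.slice r none (some maxc) = r.take maxc.toNat := PySem.List.slice_to r hmc
  unfold facscF at hlt ⊢
  rw [hsl] at hlt ⊢
  rcases facscHeaderLoop_found (r.take maxc.toNat) 0 maxc with h | ⟨k, c, hget, hc, heq⟩
  · omega
  · have hk : k < (r.take maxc.toNat).length := by
      rcases List.getElem?_eq_some_iff.mp hget with ⟨h', _⟩
      exact h'
    have hk1 : k < maxc.toNat := by simp [List.length_take] at hk; omega
    have hk2 : k < r.length := by simp [List.length_take] at hk; omega
    refine ⟨k, c, by omega, hk2, by omega, ?_, hc⟩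
    rw [List.getElem?_take_of_lt hk1] at hget
    exact hget

-- a content cell of the row below column maxc bounds the per-row index
theorem facscF_le (maxc : Int) (r : List (Option String)) (hmc : 0 ≤ maxc)
    (k : Nat) (c : Option String) (hk : (k : Int) < maxc)
    (hget : r[k]? = some c) (hc : pvCellHasContent c = true) :
    facscF maxc r ≤ (k : Int) := by
  unfold facscF
  rw [PySem.List.slice_to r hmc]
  have hk' : k < maxc.toNat := by omega
  have : (r.take maxc.toNat)[k]? = some c := by
    rw [List.getElem?_take_of_lt hk']; exact hget
  simpa using facscHeaderLoop_le (r.take maxc.toNat) 0 maxc k c this hc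

-- fold-min facts
theorem facsc_foldl_min_ge (c : Int) : ∀ (xs : List Int) (x : Int), c ≤ x → (∀ v ∈ xs, c ≤ v) →
    c ≤ xs.foldl min x := by
  intro xs
  induction xs with
  | nil => intro x hx _; exact hx
  | cons v rest ih =>
      intro x hx hall
      simp only [List.foldl_cons]
      exact ih (min x v) (le_min hx (hall v (List.mem_cons_self)))
        (fun w hw => hall w (List.mem_cons_of_mem _ hw))

theorem facsc_foldl_min_le_init : ∀ (xs : List Int) (x : Int), xs.foldl min x ≤ x := by
  intro xs
  induction xs with
  | nil => intro x; exact le_rfl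
  | cons v rest ih =>
      intro x
      simp only [List.foldl_cons]
      exact le_trans (ih (min x v)) (min_le_left x v)

theorem facsc_foldl_min_le_mem : ∀ (xs : List Int) (x v : Int), v ∈ xs → xs.foldl min x ≤ v := by
  intro xs
  induction xs with
  | nil => intro x v hv; simp at hv
  | cons w rest ih =>
      intro x v hv
      simp only [List.foldl_cons]
      rcases List.mem_cons.mp hv with rfl | hv'
      · exact le_trans (facsc_foldl_min_le_init rest (min x v)) (min_le_right x v)
      · exact ih (min x w) v hv'

theorem facsc_foldl_min_attained : ∀ (xs : List Int) (x : Int),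
    xs.foldl min x = x ∨ xs.foldl min x ∈ xs := by
  intro xs
  induction xs with
  | nil => intro x; exact Or.inl rfl
  | cons v rest ih =>
      intro x
      simp only [List.foldl_cons]
      rcases ih (min x v) with h | h
      · rcases min_cases x v with ⟨h1, _⟩ | ⟨h1, _⟩
        · rw [h, h1]; exact Or.inl rfl
        · rw [h, h1]; exact Or.inr (List.mem_cons_self)
      · exact Or.inr (List.mem_cons_of_mem _ h)

-- a max-fold is at least its initial value
theorem facsc_foldl_min_ge_max_aux : ∀ (xs : List (List (Option String))) (x : Int),
    x ≤ xs.foldl (fun a r => max a (r.length : Int)) x := by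
  intro xs
  induction xs with
  | nil => intro x; exact le_rfl
  | cons w rest ih =>
      intro x
      simp only [List.foldl_cons]
      exact le_trans (le_max_left _ _) (ih (max x w.length))

theorem facsc_foldl_max_ge_mem : ∀ (xs : List (List (Option String))) (x : Int) (r : List (Option String)),
    r ∈ xs → (r.length : Int) ≤ xs.foldl (fun a r => max a (r.length : Int)) x := by
  intro xs
  induction xs with
  | nil => intro x r hr; simp at hr
  | cons w rest ih =>
      intro x r hr
      simp only [List.foldl_cons]
      rcases List.mem_cons.mp hr with rfl | hr'
      · calc (r.length : Int) ≤ max x r.length := le_max_right _ _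
          _ ≤ _ := by
            apply facsc_foldl_min_ge_max_aux
      · exact ih (max x w.length) r hr'

-- colHasContent characterization for nonnegative columns
theorem facscColHasContent_iff (rows : List (List (Option String))) (c : Int) (hc : 0 ≤ c) :
    facscColHasContent rows c = true ↔
      ∃ r ∈ rows, ∃ cell, r[c.toNat]? = some cell ∧ pvCellHasContent cell = true := by
  unfold facscColHasContent
  rw [List.any_eq_true]
  constructor
  · rintro ⟨r, hr, hb⟩
    rw [Bool.and_eq_true, decide_eq_true_iff] at hb
    obtain ⟨hlt, hcont⟩ := hb
    have hlt' : c.toNat < r.length := by omega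
    have : PySem.List.pyGet? r c = some r[c.toNat] := by
      rw [PySem.List.pyGet?_of_nonneg r hc]
      exact List.getElem?_eq_getElem hlt'
    refine ⟨r, hr, r[c.toNat], List.getElem?_eq_getElem hlt', ?_⟩
    rw [this] at hcont
    simpa using hcont
  · rintro ⟨r, hr, cell, hget, hcont⟩
    have hlt' : c.toNat < r.length := (List.getElem?_eq_some_iff.mp hget).1
    refine ⟨r, hr, ?_⟩
    rw [Bool.and_eq_true, decide_eq_true_iff]
    refine ⟨by omega, ?_⟩
    rw [PySem.List.pyGet?_of_nonneg r hc, hget]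
    simpa using hcont

-- the column scan over [j, limit) equals the row-wise minimum form
theorem facscColScan_eq (rows : List (List (Option String))) (maxc : Int) (hmc : 0 ≤ maxc) :
    ∀ (n : Nat) (j : Int), 0 ≤ j →
      j ≤ (rows.map (facscF maxc)).foldl min maxc →
      (min maxc (rows.foldl (fun a r => max a (r.length : Int)) 0) - j).toNat = n →
      facscColScan rows (PySem.List.pyRange j (min maxc (rows.foldl (fun a r => max a (r.length : Int)) 0)) 1)
        = if (rows.map (facscF maxc)).foldl min maxc < maxc
          then (rows.map (facscF maxc)).foldl min maxc else 0 := by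
  intro n
  set maxLen := rows.foldl (fun a r => max a (r.length : Int)) 0 with hml
  set limit := min maxc maxLen with hlim
  set M := (rows.map (facscF maxc)).foldl min maxc with hM
  -- if M < maxc then M points at a content cell of some row
  have hMcontent : M < maxc → ∃ (k : Nat), (k : Int) = M ∧
      facscColHasContent rows ((k : Nat) : Int) = true ∧ M < maxLen := by
    intro hMlt
    rcases facsc_foldl_min_attained (rows.map (facscF maxc)) maxc with h | h
    · omega
    · rcases List.mem_map.mp h with ⟨r, hr, hFr⟩
      rcases facscF_content maxc r hmc (by omega) with ⟨k, cell, hkF, hklen, hkmax, hget, hcont⟩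
      rw [hFr] at hkF
      refine ⟨k, hkF, ?_, ?_⟩
      · rw [facscColHasContent_iff rows _ (by positivity)]
        refine ⟨r, hr, cell, ?_, hcont⟩
        simpa using hget
      · have := facsc_foldl_max_ge_mem rows 0 r hr
        omega
  induction n with
  | zero =>
      intro j hj0 hjM hn
      have hje : limit ≤ j := by omega
      rw [PySem.List.pyRange_one_eq_nil hje]
      have : ¬ M < maxc := by
        intro hMlt
        rcases hMcontent hMlt with ⟨k, hkM, _, hMml⟩
        omega
      simp only [facscColScan]
      rw [if_neg this]
  | succ n ih =>
      intro j hj0 hjM hn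
      have hjlt : j < limit := by omega
      rw [PySem.List.pyRange_one_cons hjlt]
      simp only [facscColScan]
      by_cases hP : facscColHasContent rows j = true
      · rw [if_pos hP]
        rcases (facscColHasContent_iff rows j hj0).mp hP with ⟨r, hr, cell, hget, hcont⟩
        have hFle : facscF maxc r ≤ j := by
          have h1 := facscF_le maxc r hmc j.toNat cell
            (by rw [Int.toNat_of_nonneg hj0]; omega) hget hcont
          rwa [Int.toNat_of_nonneg hj0] at h1
        have hMle : M ≤ facscF maxc r :=
          facsc_foldl_min_le_mem _ maxc _ (List.mem_map.mpr ⟨r, hr, rfl⟩)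
        have hMj : M = j := by omega
        rw [if_pos (by omega), hMj]
      · rw [if_neg hP]
        have hne : M ≠ j := by
          intro hMj
          have hMlt : M < maxc := by omega
          rcases hMcontent hMlt with ⟨k, hkM, hPk, _⟩
          have : ((k : Nat) : Int) = j := by omega
          rw [this] at hPk
          exact hP hPk
        exact ih (j + 1) (by omega) (by omega) (by omega)

-- a min-fold started at 0 over nonnegative values stays 0
theorem facsc_fold_zero (maxc : Int) (h : 0 ≤ maxc) :
    ∀ rows : List (List (Option String)),
      rows.foldl (fun a r => min a (facscF maxc r)) 0 = 0 := by
  intro rows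
  induction rows with
  | nil => rfl
  | cons r rest ih =>
      simp only [List.foldl_cons]
      have := (facscF_bounds maxc r h).1
      have h0 : min 0 (facscF maxc r) = 0 := by omega
      rw [h0, ih]
-- A's outer loop is the min-fold of per-row first content indexes (maxc ≥ 0)
theorem facscBlockLoop_eq_fold (maxc : Int) (h : 0 ≤ maxc) :
    ∀ (rows : List (List (Option String))) (m : Int), m ≤ maxc →
      facscBlockLoop maxc rows m = rows.foldl (fun a r => min a (facscF maxc r)) m := by
  intro rows
  induction rows with
  | nil => intro m _; rfl
  | cons row rest ih =>
      intro m hm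
      simp only [facscBlockLoop, List.foldl_cons]
      by_cases h0 : m = 0
      · subst h0
        simp only [beq_self_eq_true, if_true]
        exact (facsc_fold_zero maxc h (row :: rest)).symm
      · rw [if_neg (by simpa using h0)]
        have hrow : facscRowLoop (PySem.List.slice row none (some maxc)) 0 m
            = min m (facscF maxc row) := by
          rw [facscRowLoop_eq_min _ 0 m maxc hm]; rfl
        rw [hrow]
        by_cases h0' : min m (facscF maxc row) = 0
        · rw [if_pos (by simpa using h0'), h0']
          exact (facsc_fold_zero maxc h rest).symm
        · rw [if_neg (by simpa using h0')]
          exact ih (min m (facscF maxc row))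
            (le_trans (min_le_left _ _) hm)

-- A equals the row-wise minimum form, for nonnegative maxc
theorem facscA_eq_min_form (h : Option (List (Option String))) (d : List (List (Option String)))
    (maxc : Int) (hm : 0 ≤ maxc) :
    find_actual_content_start_column_py h d maxc
      = (let rows :=
          (match h with
           | some l => if !l.isEmpty then [l] else []
           | none => []) ++ PySem.List.slice d none (some 5)
         let M := (rows.map (facscF maxc)).foldl min maxc
         if M < maxc then M else 0) := by
  unfold find_actual_content_start_column_py
  dsimp only
  cases h with
  | none =>
      simp only [List.nil_append]
      rw [facscBlockLoop_eq_fold maxc hm _ maxc le_rfl]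
      rw [List.foldl_map]
  | some l =>
      cases hl : l.isEmpty with
      | true =>
          simp only [hl, Bool.not_true, Bool.false_eq_true, if_false, List.nil_append]
          rw [facscBlockLoop_eq_fold maxc hm _ maxc le_rfl, List.foldl_map]
      | false =>
          simp only [hl, Bool.not_false, if_true, List.cons_append, List.nil_append,
            List.map_cons, List.foldl_cons, List.foldl_map]
          have hFl : facscHeaderLoop (PySem.List.slice l none (some maxc)) 0 maxc = facscF maxc l := rfl
          rw [hFl, facscBlockLoop_eq_fold maxc hm _ _ (facscF_bounds maxc l hm).2]
          have : min maxc (facscF maxc l) = facscF maxc l := by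
            have := (facscF_bounds maxc l hm).2; omega
          rw [this]
-- lower bound for the inner row loop
theorem facscRowLoop_ge (xs : List (Option String)) : ∀ (i m : Int),
    min m i ≤ facscRowLoop xs i m := by
  induction xs with
  | nil => intro i m; simp only [facscRowLoop]; omega
  | cons c rest ih =>
      intro i m
      simp only [facscRowLoop]
      split
      · split
        · omega
        · have := ih (i + 1) (min m i)
          omega
      · have := ih (i + 1) m
        omega

-- lower bound for A's outer loop when maxc ≤ 0
theorem facscBlockLoop_ge (maxc : Int) (h : maxc ≤ 0) :
    ∀ (rows : List (List (Option String))) (m : Int), maxc ≤ m →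
      maxc ≤ facscBlockLoop maxc rows m := by
  intro rows
  induction rows with
  | nil => intro m hm; exact hm
  | cons row rest ih =>
      intro m hm
      simp only [facscBlockLoop]
      split
      · exact hm
      · have hrow := facscRowLoop_ge (PySem.List.slice row none (some maxc)) 0 m
        split
        · omega
        · exact ih _ (by omega)

-- both ports return 0 when maxc ≤ 0
theorem facsc_nonpos_eq (h : Option (List (Option String))) (d : List (List (Option String)))
    (maxc : Int) (hm : maxc ≤ 0) :
    find_actual_content_start_column_py h d maxc
      = find_actual_content_start_column_py_alt h d maxc := by
  unfold find_actual_content_start_column_py find_actual_content_start_column_py_alt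
  have hA : ∀ m1 : Int, maxc ≤ m1 →
      ¬ (facscBlockLoop maxc (PySem.List.slice d none (some 5)) m1 < maxc) := by
    intro m1 h1
    exact not_lt.mpr (facscBlockLoop_ge maxc hm _ m1 h1)
  dsimp only
  have hlim : min maxc (((match h with
      | some l => if !l.isEmpty then [l] else []
      | none => []) ++ PySem.List.slice d none (some 5)).foldl (fun a r => max a (r.length : Int)) 0) ≤ 0 :=
    le_trans (min_le_left _ _) hm
  rw [PySem.List.pyRange_one_eq_nil (by omega)]
  simp only [facscColScan]
  cases h with
  | none => rw [if_neg (hA maxc le_rfl)]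
  | some l =>
      cases hl : l.isEmpty with
      | true =>
          simp only [hl, Bool.not_true, Bool.false_eq_true, if_false]
          rw [if_neg (hA maxc le_rfl)]
      | false =>
          simp only [hl, Bool.not_false, if_true]
          have h1 : maxc ≤ facscHeaderLoop (PySem.List.slice l none (some maxc)) 0 maxc :=
            facscF_ge maxc l hm
          rw [if_neg (hA _ h1)]

-- both ports agree when 0 ≤ maxc
theorem facsc_nonneg_eq (h : Option (List (Option String))) (d : List (List (Option String)))
    (maxc : Int) (hm : 0 ≤ maxc) :
    find_actual_content_start_column_py h d maxc
      = find_actual_content_start_column_py_alt h d maxc := by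
  rw [facscA_eq_min_form h d maxc hm]
  unfold find_actual_content_start_column_py_alt
  dsimp only
  set rows := (match h with
     | some l => if !l.isEmpty then [l] else []
     | none => []) ++ PySem.List.slice d none (some 5) with hrows
  have hM0 : 0 ≤ (rows.map (facscF maxc)).foldl min maxc := by
    apply facsc_foldl_min_ge 0 _ maxc hm
    intro v hv
    rcases List.mem_map.mp hv with ⟨r, _, hr⟩
    rw [← hr]
    exact (facscF_bounds maxc r hm).1
  exact (facscColScan_eq rows maxc hm
    (min maxc (rows.foldl (fun a r => max a (r.length : Int)) 0) - 0).toNat 0 le_rfl hM0 rfl).symm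

-- ===== VERDICT (by name: the statement is the Claim_ definition above) =====
theorem find_actual_content_start_column_py_spec : Claim_equal_find_actual_content_start_column_py := by
  intro h d maxc _dom
  unfold Spec_find_actual_content_start_column_py
  by_cases hm : maxc ≤ 0
  · exact facsc_nonpos_eq h d maxc hm
  · exact facsc_nonneg_eq h d maxc (by omega)
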